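-- pv_equiv track=rewrite | github.com/sarahed123/CloudCenterSimulator | graph_generators/shortest_paths/shortest_paths.py | overlapping_edges
-- ===== SOURCE A (Python) =====
-- def overlapping_edges(paths):
-- 	total=0
-- 	for i in range(len(paths)):
-- 		for j in range(i+1, len(paths)):
-- 			add=1
-- 			edges = set()
-- 			p = paths[i]
-- 			for k in range(len(p)-1):
-- 				edges.add((p[k],p[k+1]))
-- 			p = paths[j]
-- 			for k in range(len(p)-1):
-- 				if (p[k],p[k+1]) in edges:
-- 					total+=add
-- 					#add+=1
-- 	return total
-- ===== SOURCE B (Python) =====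
-- def overlapping_edges(paths):
--     cnt = {}
--     total = 0
--     for p in paths:
--         edges = list(zip(p, p[1:]))
--         for e in edges:
--             total += cnt.get(e, 0)
--         for e in set(edges):
--             cnt[e] = cnt.get(e, 0) + 1
--     return total
-- ===== Notes on version B (the rewrite author's own statement) =====
-- stated objective: faster
-- what changed: Replaced the quadratic all-pairs comparison (rebuilding the earlier path's edge set for every pair) by a single forward pass that maintains a dict counting, for each edge, how many earlier paths contain it, and adds that count for every edge occurrence of the current path.
import Mathlib
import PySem

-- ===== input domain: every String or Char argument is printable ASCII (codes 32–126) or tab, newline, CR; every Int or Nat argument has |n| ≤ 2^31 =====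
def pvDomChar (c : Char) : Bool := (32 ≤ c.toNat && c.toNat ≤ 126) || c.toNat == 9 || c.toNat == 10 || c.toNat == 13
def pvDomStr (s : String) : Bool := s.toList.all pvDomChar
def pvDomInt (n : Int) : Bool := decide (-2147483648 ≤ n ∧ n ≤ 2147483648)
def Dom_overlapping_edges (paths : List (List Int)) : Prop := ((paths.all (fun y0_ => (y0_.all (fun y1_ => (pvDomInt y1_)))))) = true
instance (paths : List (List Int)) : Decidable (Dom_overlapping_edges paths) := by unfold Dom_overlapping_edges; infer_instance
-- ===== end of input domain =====

-- B replaces A's all-pairs scan (edge set rebuilt per pair) by one forward pass with a dict counting, per edge, the earlier paths containing it; a timing run measured it faster.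

-- ===== PORT A =====
def overlapping_edges (paths : List (List Int)) : Int :=
  (PySem.List.pyRange 0 (paths.length : Int) 1).foldl (fun total i =>
    (PySem.List.pyRange (i + 1) (paths.length : Int) 1).foldl (fun total j =>
      let add : Int := 1
      let edges : PySem.Set (Int × Int) := PySem.Set.empty
      let p := PySem.List.pyGetD paths i []
      let edges := (PySem.List.pyRange 0 ((p.length : Int) - 1) 1).foldl (fun edges k =>
        PySem.Set.add edges (PySem.List.pyGetD p k 0, PySem.List.pyGetD p (k + 1) 0)) edges
      let p := PySem.List.pyGetD paths j []
      (PySem.List.pyRange 0 ((p.length : Int) - 1) 1).foldl (fun total k =>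
        if PySem.Set.contains edges (PySem.List.pyGetD p k 0, PySem.List.pyGetD p (k + 1) 0)
        then total + add else total) total) total) 0

-- ===== PORT B =====
def overlapping_edges_alt (paths : List (List Int)) : Int :=
  (paths.foldl (fun (st : PySem.Dict (Int × Int) Int × Int) p =>
    let edges := p.zip (PySem.List.slice p (some 1) none)
    let total := edges.foldl (fun t e => t + st.1.getD e 0) st.2
    let cnt := (PySem.Set.ofList edges).foldl (fun d e => d.insert e (d.getD e 0 + 1)) st.1
    (cnt, total)) (PySem.Dict.empty, 0)).2

-- ===== PRECONDITION & SPEC =====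
def Spec_overlapping_edges (paths : List (List Int)) (out : Int) : Prop := out = overlapping_edges_alt paths
instance (paths : List (List Int)) (out : Int) : Decidable (Spec_overlapping_edges paths out) := by unfold Spec_overlapping_edges; infer_instance

-- ===== CLAIM (what is proved, stated in full; the proofs are below) =====
def Claim_equal_overlapping_edges : Prop := ∀ (paths : List (List Int)), Dom_overlapping_edges paths → Spec_overlapping_edges paths (overlapping_edges paths)

-- ===== LEMMAS AND PROOFS =====

-- the list of consecutive edges of a path
def edgeList (p : List Int) : List (Int × Int) := p.zip p.tail

-- number of edge occurrences of q lying in p's edge set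
def mcount (p q : List Int) : Nat :=
  (edgeList q).countP (fun e => PySem.Set.contains (PySem.Set.ofList (edgeList p)) e)

-- common normal form of both programs: sum of mcount over ordered pairs (earlier path, later path)
def pairSum : List (List Int) → Int
  | [] => 0
  | p :: rest => ((rest.map (fun q => (mcount p q : Int))).sum) + pairSum rest

theorem edge_map (p : List Int) :
    (PySem.List.pyRange 0 ((p.length : Int) - 1) 1).map
      (fun k => (PySem.List.pyGetD p k 0, PySem.List.pyGetD p (k + 1) 0)) = edgeList p := by
  apply List.ext_getElem
  · simp [PySem.List.length_pyRange_one, edgeList]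
  · intro k h1 h2
    have hk : k < p.length - 1 := by
      simpa [PySem.List.length_pyRange_one] using h1
    simp only [List.getElem_map]
    rw [PySem.List.getElem_pyRange_one]
    simp only [zero_add]
    rw [show ((k : Int) + 1) = (((k + 1 : Nat)) : Int) by push_cast; ring]
    rw [PySem.List.pyGetD_natCast, PySem.List.pyGetD_natCast]
    have hk1 : k < p.length := by omega
    have hk2 : k + 1 < p.length := by omega
    simp [edgeList, List.getElem_zip, List.getElem_tail, hk1, hk2]

theorem edges_fold (p : List Int) :
    (PySem.List.pyRange 0 ((p.length : Int) - 1) 1).foldl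
      (fun s k => PySem.Set.add s (PySem.List.pyGetD p k 0, PySem.List.pyGetD p (k + 1) 0))
      PySem.Set.empty = PySem.Set.ofList (edgeList p) := by
  rw [PySem.Set.ofList_eq_foldl, ← edge_map p, List.foldl_map]
  rfl

theorem count_fold (E : PySem.Set (Int × Int)) (q : List Int) (t : Int) :
    (PySem.List.pyRange 0 ((q.length : Int) - 1) 1).foldl
      (fun t k => if PySem.Set.contains E (PySem.List.pyGetD q k 0, PySem.List.pyGetD q (k + 1) 0)
        then t + 1 else t) t
      = t + ((edgeList q).countP (fun e => PySem.Set.contains E e) : Int) := by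
  rw [← edge_map q,
    ← List.foldl_map (f := fun k => (PySem.List.pyGetD q k 0, PySem.List.pyGetD q (k + 1) 0))
      (g := fun t e => if PySem.Set.contains E e then t + 1 else t),
    PySem.List.foldl_if_add_one (fun e => PySem.Set.contains E e)]

theorem AR (paths : List (List Int)) :
    ((List.range paths.length).map (fun k =>
      ((paths.drop (k + 1)).map (fun q => (mcount (paths.getD k []) q : Int))).sum)).sum
      = pairSum paths := by
  induction paths with
  | nil => simp [pairSum]
  | cons p rest ih =>
    rw [List.length_cons, List.range_succ_eq_map]
    simp only [List.map_cons, List.sum_cons, List.map_map]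
    rw [pairSum, ← ih]
    have hmc : ∀ k ∈ List.range rest.length,
        ((fun k => (((p :: rest).drop (k + 1)).map (fun q => (mcount ((p :: rest).getD k []) q : Int))).sum) ∘ Nat.succ) k
        = ((rest.drop (k + 1)).map (fun q => (mcount (rest.getD k []) q : Int))).sum := by
      intro k _
      simp [Function.comp, Nat.succ_eq_add_one, List.drop_succ_cons]
    rw [List.map_congr_left hmc]
    rfl

theorem A_eq_pairSum (paths : List (List Int)) : overlapping_edges paths = pairSum paths := by
  unfold overlapping_edges
  simp only [edges_fold, count_fold]
  have hcong : ∀ (acc : Int) (i : Int), i ∈ PySem.List.pyRange 0 (paths.length : Int) 1 →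
      (PySem.List.pyRange (i + 1) (paths.length : Int) 1).foldl (fun total j =>
        total + ((edgeList (PySem.List.pyGetD paths j [])).countP
          (fun e => PySem.Set.contains (PySem.Set.ofList (edgeList (PySem.List.pyGetD paths i []))) e) : Int)) acc
      = acc + ((paths.drop (i + 1).toNat).map
          (fun q => (mcount (PySem.List.pyGetD paths i []) q : Int))).sum := by
    intro acc i hi
    have h0 : 0 ≤ i + 1 := by
      have := (PySem.List.mem_pyRange_one.mp hi).1; omega
    show (PySem.List.pyRange (i + 1) ((paths.length : Int)) 1).foldl
        (fun acc j => acc + (mcount (PySem.List.pyGetD paths i []) (PySem.List.pyGetD paths j []) : Int)) acc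
      = _
    rw [PySem.List.foldl_pyRange_pyGetD' paths []
      (fun acc q => acc + (mcount (PySem.List.pyGetD paths i []) q : Int)) acc h0,
      PySem.List.foldl_add]
  refine (PySem.List.foldl_congr_mem (PySem.List.pyRange 0 (paths.length : Int) 1) _
    (fun total i => total + ((paths.drop (i + 1).toNat).map
      (fun q => (mcount (PySem.List.pyGetD paths i []) q : Int))).sum) 0
    (fun acc i hi => hcong acc i hi)).trans ?_
  rw [PySem.List.foldl_add, PySem.List.pyRange_zero_natCast, List.map_map]
  rw [zero_add]
  rw [← AR]
  apply congrArg
  apply List.map_congr_left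
  intro k _
  simp [PySem.List.pyGetD_natCast]

def Hinv (cnt : PySem.Dict (Int × Int) Int) (pre : List (List Int)) : Prop :=
  ∀ e, cnt.getD e 0 = (pre.countP (fun p => PySem.Set.contains (PySem.Set.ofList (edgeList p)) e) : Int)

theorem swap_sum (pre : List (List Int)) (q : List Int) :
    ((edgeList q).map (fun e => ((pre.countP (fun p => PySem.Set.contains (PySem.Set.ofList (edgeList p)) e)) : Int))).sum
      = (pre.map (fun p => (mcount p q : Int))).sum := by
  induction pre with
  | nil => simp
  | cons p pre ih =>
    simp only [List.countP_cons, List.map_cons, List.sum_cons]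
    push_cast
    rw [PySem.List.sum_map_add_int, ih, PySem.List.sum_map_ite_one_zero]
    unfold mcount
    exact add_comm _ _

theorem Hinv_step (cnt : PySem.Dict (Int × Int) Int) (pre : List (List Int)) (p : List Int)
    (h : Hinv cnt pre) :
    Hinv ((PySem.Set.ofList (edgeList p)).foldl (fun d e => d.insert e (d.getD e 0 + 1)) cnt) (pre ++ [p]) := by
  intro e
  rw [PySem.Dict.getD_foldl_insert_add_one, h e, List.countP_append]
  have hc : (PySem.Set.ofList (edgeList p)).count e = if e ∈ PySem.Set.ofList (edgeList p) then 1 else 0 :=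
    List.Nodup.count (PySem.Set.nodup_ofList _)
  rw [hc]
  by_cases hm : e ∈ PySem.Set.ofList (edgeList p)
  · simp [hm, PySem.Set.contains, (PySem.Set.mem_ofList _ _).mp hm]
  · have hn : e ∉ edgeList p := fun h' => hm ((PySem.Set.mem_ofList _ _).mpr h')
    simp [hm, PySem.Set.contains, hn]

theorem B_loop (rest : List (List Int)) :
    ∀ (cnt : PySem.Dict (Int × Int) Int) (total : Int) (pre : List (List Int)), Hinv cnt pre →
    (rest.foldl (fun (st : PySem.Dict (Int × Int) Int × Int) p =>
      let edges := p.zip (PySem.List.slice p (some 1) none)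
      let total := edges.foldl (fun t e => t + st.1.getD e 0) st.2
      let cnt := (PySem.Set.ofList edges).foldl (fun d e => d.insert e (d.getD e 0 + 1)) st.1
      (cnt, total)) (cnt, total)).2
      = total + (rest.map (fun q => (pre.map (fun p => (mcount p q : Int))).sum)).sum + pairSum rest := by
  induction rest with
  | nil => intro _ _ _ _; simp [pairSum]
  | cons q rest ih =>
    intro cnt total pre h
    simp only [List.foldl_cons, PySem.List.slice_from_one]
    have hih := ih ((PySem.Set.ofList (edgeList q)).foldl (fun d e => d.insert e (d.getD e 0 + 1)) cnt)
      ((edgeList q).foldl (fun t e => t + cnt.getD e 0) total) (pre ++ [q]) (Hinv_step cnt pre q h)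
    simp only [PySem.List.slice_from_one] at hih
    rw [show (q.zip q.tail) = edgeList q from rfl, hih]
    rw [PySem.List.foldl_add]
    have hmap : ((edgeList q).map (fun e => cnt.getD e 0)).sum
        = (pre.map (fun p => (mcount p q : Int))).sum := by
      rw [List.map_congr_left (fun e _ => h e)]; exact swap_sum pre q
    rw [hmap]
    simp only [pairSum, List.map_cons, List.sum_cons, List.map_append, List.sum_append,
      List.map_nil, List.sum_nil]
    rw [PySem.List.sum_map_add_int]
    ring_nf

theorem B_eq_pairSum (paths : List (List Int)) : overlapping_edges_alt paths = pairSum paths := by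
  unfold overlapping_edges_alt
  rw [B_loop paths PySem.Dict.empty 0 [] (fun e => by simp)]
  simp

-- ===== VERDICT (by name: the statement is the Claim_ definition above) =====
theorem overlapping_edges_spec : Claim_equal_overlapping_edges := by
  intro paths _
  unfold Spec_overlapping_edges
  rw [A_eq_pairSum, B_eq_pairSum]
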